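-- pv_equiv track=rewrite | github.com/arcticoder/casimir-ultra-smooth-fabrication-platform | src/digital_twin/uncertainty_propagation.py | generate_multi_indices
-- ===== SOURCE A (Python) =====
-- from typing import Dict, List, Tuple, Callable, Optional, Any
-- import itertools
--
-- def generate_multi_indices(num_vars: int, max_order: int) -> List[Tuple]:
--     """Generate multi-indices for PCE basis"""
--     indices = []
--
--     for total_order in range(max_order + 1):
--         for alpha in itertools.combinations_with_replacement(range(num_vars), total_order):
--             # Convert to multi-index format
--             multi_index = [0] * num_vars
--             for var_idx in alpha:
--                 multi_index[var_idx] += 1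
--             indices.append(tuple(multi_index))
--
--     return indices
-- ===== SOURCE B (Python) =====
-- def generate_multi_indices(num_vars, max_order):
--     """Generate PCE multi-indices by iterating a next-composition step (no itertools)."""
--     if num_vars <= 0:
--         return [()] if max_order >= 0 else []
--     out = []
--     for total in range(max_order + 1):
--         v = [total] + [0] * (num_vars - 1)
--         while True:
--             out.append(tuple(v))
--             if v[-1] == total:
--                 break
--             # next composition (first variable's count descending): move one unit
--             # from the rightmost positive non-last slot one step right, carrying
--             # the last slot's content with it.
--             last = v.pop()
--             while v[-1] == 0:
--                 v.pop()
--             v[-1] -= 1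
--             v.append(last + 1)
--             v.extend([0] * (num_vars - len(v)))
--     return out
-- ===== Notes on version B (the rewrite author's own statement) =====
-- stated objective: alternative
-- what changed: Replaces itertools.combinations_with_replacement plus a per-tuple counting pass with an iterative next-composition successor loop that emits the count vectors directly (no itertools, no intermediate index tuples, no recursion).
import Mathlib
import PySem

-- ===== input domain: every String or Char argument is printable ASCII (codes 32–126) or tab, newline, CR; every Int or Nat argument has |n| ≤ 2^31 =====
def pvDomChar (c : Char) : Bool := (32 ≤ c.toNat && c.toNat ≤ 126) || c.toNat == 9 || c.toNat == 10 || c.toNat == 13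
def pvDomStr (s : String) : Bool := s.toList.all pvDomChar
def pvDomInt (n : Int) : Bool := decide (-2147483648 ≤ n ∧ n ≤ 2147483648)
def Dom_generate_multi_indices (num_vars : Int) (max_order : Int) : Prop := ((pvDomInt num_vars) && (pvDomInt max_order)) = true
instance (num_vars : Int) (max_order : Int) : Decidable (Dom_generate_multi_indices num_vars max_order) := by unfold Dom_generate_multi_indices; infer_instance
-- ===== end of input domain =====

-- B replaces itertools.combinations_with_replacement + a counting pass by an iterative
-- next-composition successor loop over the count vectors (objective: alternative algorithm).


-- ===== PORT A =====
-- itertools.combinations_with_replacement(pool, r), ported by its documented semantics: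
-- all non-decreasing (w.r.t. pool position) r-tuples of pool elements, in lexicographic order.
def cwr {α : Type} : List α → Nat → List (List α)
  | _, 0 => [[]]
  | [], _+1 => []
  | x :: xs, t+1 => ((cwr (x :: xs) t).map (fun a => x :: a)) ++ cwr xs (t+1)
termination_by pool t => (t, pool.length)

-- 'multi_index[var_idx] += 1'; var_idx comes from range(num_vars) so it is a valid
-- non-negative index and .toNat is exact here.
def bump (m : List Int) (i : Int) : List Int := m.modify i.toNat (· + 1)

-- 'multi_index = [0]*num_vars; for var_idx in alpha: multi_index[var_idx] += 1'
def toCounts (n : Nat) (alpha : List Int) : List Int := alpha.foldl bump (List.replicate n 0)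

def generate_multi_indices (num_vars : Int) (max_order : Int) : List (List Int) :=
  (PySem.List.pyRange 0 (max_order + 1) 1).foldl
    (fun acc t =>
      acc ++ (cwr (PySem.List.pyRange 0 num_vars 1) t.toNat).map (toCounts num_vars.toNat))
    []

-- ===== PORT B =====
-- the in-place splice 'last = v.pop(); while v[-1]==0: v.pop(); v[-1] -= 1;
-- v.append(last+1); v.extend([0]*(num_vars-len(v)))', ported on the reversed list;
-- the two [] branches are unreachable from the loop (totality guards only)
def stepComp (n : Nat) (v : List Int) : List Int :=
  match v.reverse with
  | [] => []
  | last :: rest =>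
    match rest.dropWhile (fun x => x == 0) with
    | [] => []
    | m :: rest' =>
      let w := ((m - 1) :: rest').reverse ++ [last + 1]
      w ++ List.replicate (n - w.length) 0

-- 'while True: out.append(tuple(v)); if v[-1] == total: break; <splice>';
-- fuel is a totality guard only, chosen large enough (see loopB_comp below)
def loopB (n : Nat) (total : Int) : Nat → List Int → List (List Int)
  | 0, _ => []
  | fuel+1, v =>
    if v.getLast? = some total then [v] else v :: loopB n total fuel (stepComp n v)

def fuelB (n : Nat) (total : Int) : Nat := (total.toNat + 1) ^ n

def generate_multi_indices_alt (num_vars : Int) (max_order : Int) : List (List Int) :=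
  if num_vars ≤ 0 then (if 0 ≤ max_order then [[]] else [])
  else (List.range (max_order + 1).toNat).flatMap (fun t : Nat =>
    loopB num_vars.toNat (t : Int) (fuelB num_vars.toNat (t : Int))
      ((t : Int) :: List.replicate (num_vars.toNat - 1) 0))

-- ===== PRECONDITION & SPEC =====
def Spec_generate_multi_indices (num_vars : Int) (max_order : Int) (out : List (List Int)) : Prop := out = generate_multi_indices_alt num_vars max_order
instance (num_vars : Int) (max_order : Int) (out : List (List Int)) : Decidable (Spec_generate_multi_indices num_vars max_order out) := by unfold Spec_generate_multi_indices; infer_instance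

-- ===== CLAIM (what is proved, stated in full; the proofs are below) =====
def Claim_equal_generate_multi_indices : Prop := ∀ (num_vars : Int) (max_order : Int), Dom_generate_multi_indices num_vars max_order → Spec_generate_multi_indices num_vars max_order (generate_multi_indices num_vars max_order)

-- ===== LEMMAS AND PROOFS =====

lemma cwr_zero {α : Type} (pool : List α) : cwr pool 0 = [[]] := by
  cases pool <;> simp [cwr]

lemma cwr_nil_succ {α : Type} (t : Nat) : cwr ([] : List α) (t+1) = [] := by simp [cwr]

lemma cwr_cons_succ {α : Type} (x : α) (xs : List α) (t : Nat) :
    cwr (x :: xs) (t+1) = ((cwr (x :: xs) t).map (fun a => x :: a)) ++ cwr xs (t+1) := by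
  simp [cwr]

-- cwr of a singleton pool
lemma cwr_singleton {α : Type} (x : α) : ∀ t, cwr [x] t = [List.replicate t x] := by
  intro t; induction t with
  | zero => simp [cwr]
  | succ t ih => simp [cwr, ih, List.replicate_succ]

-- relabeling
lemma cwr_map {α β : Type} (f : α → β) :
    ∀ (t : Nat) (pool : List α), cwr (pool.map f) t = (cwr pool t).map (List.map f) := by
  intro t
  induction t with
  | zero => intro pool; simp [cwr]
  | succ t ih =>
    intro pool
    induction pool with
    | nil => simp [cwr]
    | cons x xs ihp =>
      have hc : f x :: xs.map f = (x :: xs).map f := rfl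
      rw [List.map_cons, cwr_cons_succ, cwr_cons_succ, hc, ih, ihp]
      simp [List.map_map, Function.comp_def]

-- elements of cwr's tuples come from the pool
lemma cwr_mem {α : Type} :
    ∀ (t : Nat) (pool : List α) (a : List α), a ∈ cwr pool t → ∀ y ∈ a, y ∈ pool := by
  intro t
  induction t with
  | zero => intro pool a ha; rw [cwr_zero] at ha; simp at ha; subst ha; simp
  | succ t ih =>
    intro pool
    induction pool with
    | nil => intro a ha; rw [cwr_nil_succ] at ha; simp at ha
    | cons x xs ihp =>
      intro a ha y hy
      rw [cwr_cons_succ] at ha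
      simp only [List.mem_append, List.mem_map] at ha
      rcases ha with ⟨b, hb, rfl⟩ | ha
      · rcases List.mem_cons.mp hy with rfl | hy
        · exact List.mem_cons_self
        · exact ih _ b hb y hy
      · exact List.mem_cons_of_mem _ (ihp a ha y hy)

-- grouping cwr by the multiplicity of the head element, descending
lemma cwr_cons {α : Type} (x : α) (xs : List α) :
    ∀ t, cwr (x :: xs) t =
      ((List.range (t+1)).reverse).flatMap
        (fun c => (cwr xs (t - c)).map (fun b => List.replicate c x ++ b)) := by
  intro t
  induction t with
  | zero => simp [cwr_zero]
  | succ t ih =>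
    have hsplit : (List.range (t+2)).reverse
        = ((List.range (t+1)).reverse).map (· + 1) ++ [0] := by
      rw [List.range_succ_eq_map]
      simp [List.map_reverse]
    rw [cwr_cons_succ, ih, hsplit]
    rw [List.flatMap_append, List.flatMap_map, List.map_flatMap]
    simp [List.map_map, Function.comp_def, List.replicate_succ]

-- folding bump over mapped-up indices leaves the head alone
lemma foldl_bump_shift :
    ∀ (beta : List Int), (∀ y ∈ beta, 0 ≤ y) → ∀ (a : Int) (m : List Int),
      (beta.map (· + 1)).foldl bump (a :: m) = a :: beta.foldl bump m := by
  intro beta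
  induction beta with
  | nil => intro _ a m; simp
  | cons y ys ih =>
    intro h a m
    have hy : 0 ≤ y := h y List.mem_cons_self
    have ht : (y + 1).toNat = y.toNat + 1 := by omega
    have hstep : bump (a :: m) (y + 1) = a :: bump m y := by
      simp [bump, ht, List.modify]
    simp only [List.map_cons, List.foldl_cons, hstep]
    exact ih (fun z hz => h z (List.mem_cons_of_mem _ hz)) a (bump m y)

lemma foldl_bump_zeros :
    ∀ (c : Nat) (a : Int) (m : List Int),
      (List.replicate c (0:Int)).foldl bump (a :: m) = (a + c) :: m := by
  intro c
  induction c with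
  | zero => intro a m; simp
  | succ c ih =>
    intro a m
    have : bump (a :: m) 0 = (a + 1) :: m := by simp [bump, List.modify]
    simp only [List.replicate_succ, List.foldl_cons, this, ih]
    congr 1
    push_cast; ring

lemma toCounts_cons (v : Nat) (c : Nat) (beta : List Int) (h : ∀ y ∈ beta, 0 ≤ y) :
    toCounts (v+1) (List.replicate c 0 ++ beta.map (· + 1))
      = (c : Int) :: toCounts v beta := by
  unfold toCounts
  rw [List.foldl_append, List.replicate_succ, foldl_bump_zeros, foldl_bump_shift beta h]
  simp

-- the pool of A is the cast nat range
lemma pool_eq (n : Int) :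
    PySem.List.pyRange 0 n 1 = (List.range n.toNat).map (fun k : Nat => (k : Int)) := by
  rw [PySem.List.pyRange_one]
  simp only [Int.sub_zero, zero_add]

-- proof-side bridge: the sequence of count vectors of total t over v vars, first
-- variable's count descending (both ports are shown to produce its concatenation)
def comp : Nat → Nat → List (List Int)
  | 0, _ => []
  | 1, t => [[(t : Int)]]
  | v+2, t => ((List.range (t+1)).reverse).flatMap
      (fun c => (comp (v+1) (t - c)).map (fun rest => ((c : Int)) :: rest))

-- MAIN: counts of cwr over range(v+1) with total t = comp (v+1) t
lemma cwr_counts :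
    ∀ (v t : Nat),
      (cwr ((List.range (v+1)).map (fun k : Nat => (k : Int))) t).map (toCounts (v+1))
        = comp (v+1) t := by
  intro v
  induction v with
  | zero =>
    intro t
    simp only [Nat.zero_add, List.range_one, List.map_cons, List.map_nil, cwr_singleton,
      Nat.cast_zero]
    have : toCounts 1 (List.replicate t (0:Int)) = [(t : Int)] := by
      unfold toCounts
      have := foldl_bump_zeros t 0 ([] : List Int)
      simpa using this
    simp [this, comp]
  | succ v ih =>
    intro t
    have hpool : (List.range (v+2)).map (fun k : Nat => (k : Int))
        = (0 : Int) :: ((List.range (v+1)).map (fun k : Nat => (k : Int))).map (· + 1) := by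
      rw [List.range_succ_eq_map, List.map_cons, List.map_map, List.map_map]
      congr 1
    rw [hpool, cwr_cons]
    rw [List.map_flatMap]
    show _ = comp (v+2) t
    simp only [comp]
    apply congrArg List.flatten
    apply List.map_congr_left
    intro c _
    rw [cwr_map, List.map_map, List.map_map]
    rw [← ih (t - c), List.map_map]
    apply List.map_congr_left
    intro beta hbeta
    have hnn : ∀ y ∈ beta, 0 ≤ y := by
      intro y hy
      have hmem := cwr_mem (t - c) _ beta hbeta y hy
      simp only [List.mem_map] at hmem
      obtain ⟨k, _, hk⟩ := hmem
      omega
    simpa [Function.comp] using toCounts_cons (v+1) c beta hnn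

-- cwr over the empty pool
lemma cwr_nil_pos {α : Type} (t : Nat) (h : t ≠ 0) : cwr ([] : List α) t = [] := by
  cases t with
  | zero => exact absurd rfl h
  | succ t => exact cwr_nil_succ t

-- ------ B side: the successor loop enumerates comp ------

lemma comp_ne_nil : ∀ (v s : Nat), comp (v+1) s ≠ [] := by
  intro v
  induction v with
  | zero => intro s; simp [comp]
  | succ v ih =>
    intro s
    have hrev : (List.range (s+1)).reverse = s :: (List.range s).reverse := by
      rw [List.range_succ]; simp
    simp only [comp, hrev, List.flatMap_cons]
    simp
    intro h
    exact absurd h (ih 0)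

lemma comp_head : ∀ (v s : Nat),
    (comp (v+1) s).head? = some ((s : Int) :: List.replicate v 0) := by
  intro v
  induction v with
  | zero => intro s; simp [comp]
  | succ v ih =>
    intro s
    have hrev : (List.range (s+1)).reverse = s :: (List.range s).reverse := by
      rw [List.range_succ]; simp
    simp only [comp, hrev, List.flatMap_cons]
    rw [List.head?_append, List.head?_map, Nat.sub_self, ih 0]
    simp [List.replicate_succ]

lemma comp_getLast : ∀ (v s : Nat),
    (comp (v+1) s).getLast? = some (List.replicate v (0:Int) ++ [(s : Int)]) := by
  intro v
  induction v with
  | zero => intro s; simp [comp]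
  | succ v ih =>
    intro s
    have hrev : (List.range (s+1)).reverse
        = ((List.range s).map (· + 1)).reverse ++ [0] := by
      rw [List.range_succ_eq_map]; simp
    simp only [comp, hrev, List.flatMap_append, List.flatMap_cons, List.flatMap_nil,
      List.append_nil]
    rw [List.getLast?_append, List.getLast?_map, Nat.sub_zero, ih s]
    simp [List.replicate_succ]

-- the successor relation along which the loop walks (carries the invariants)
def StepRel (n : Nat) (s : Int) (a b : List Int) : Prop :=
  a.length = n ∧ (∀ x ∈ a, 0 ≤ x) ∧ a.sum = s ∧ (∃ x ∈ a.dropLast, 0 < x) ∧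
    stepComp n a = b

-- the splice commutes with prepending an untouched first slot
lemma step_cons (n : Nat) (c : Int) (a b : List Int)
    (hlen : a.length = n) (hpos : ∃ x ∈ a.dropLast, 0 < x)
    (hstep : stepComp n a = b) : stepComp (n+1) (c :: a) = c :: b := by
  obtain ⟨x, hx, hxpos⟩ := hpos
  have hane : a ≠ [] := by rintro rfl; simp at hx
  have hdec := List.dropLast_append_getLast hane
  have hdw : (a.dropLast.reverse).dropWhile (fun x => x == 0) ≠ [] := by
    rw [Ne, List.dropWhile_eq_nil_iff]
    push Not
    exact ⟨x, by simpa using hx, by simp; omega⟩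
  obtain ⟨m, rest0, hmr⟩ : ∃ m rest0,
      (a.dropLast.reverse).dropWhile (fun x => x == 0) = m :: rest0 := by
    cases h : (a.dropLast.reverse).dropWhile (fun x => x == 0) with
    | nil => exact absurd h hdw
    | cons m r => exact ⟨m, r, rfl⟩
  have hrev : a.reverse = a.getLast hane :: a.dropLast.reverse := by
    conv_lhs => rw [← hdec]
    simp
  have hrevc : (c :: a).reverse = a.getLast hane :: (a.dropLast.reverse ++ [c]) := by
    simp [hrev]
  have hdwc : (a.dropLast.reverse ++ [c]).dropWhile (fun x => x == 0)
      = m :: (rest0 ++ [c]) := by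
    rw [List.dropWhile_append]
    simp [hmr]
  rw [← hstep]
  simp only [stepComp, hrev, hrevc, hmr, hdwc]
  have hlw : ((m - 1) :: (rest0 ++ [c])) = ((m - 1) :: rest0) ++ [c] := by simp
  rw [hlw]
  simp [List.reverse_append]

-- the splice across a block boundary
lemma step_block (vv : Nat) (c d : Int) (hc : 0 ≤ c) :
    stepComp (vv+2) ((c+1) :: (List.replicate vv 0 ++ [d]))
      = c :: (d+1) :: List.replicate vv 0 := by
  have h1 : ((c+1) :: (List.replicate vv (0:Int) ++ [d])).reverse
      = d :: (List.replicate vv 0 ++ [c+1]) := by simp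
  have h2 : (List.replicate vv (0:Int) ++ [c+1]).dropWhile (fun x => x == 0)
      = [c+1] := by
    rw [List.dropWhile_append]
    simp
    intro h; omega
  simp only [stepComp, h1, h2]
  simp

-- one cons-step preserves the successor relation
lemma steprel_cons (n : Nat) (s c : Int) (hc : 0 ≤ c) (a b : List Int)
    (h : StepRel n (s - c) a b) : StepRel (n+1) s (c :: a) (c :: b) := by
  obtain ⟨hlen, hnn, hsum, hpos, hstep⟩ := h
  obtain ⟨x, hx, hxpos⟩ := hpos
  have hane : a ≠ [] := by rintro rfl; simp at hx
  refine ⟨by simp [hlen], ?_, by simp [hsum], ?_, step_cons n c a b hlen ⟨x, hx, hxpos⟩ hstep⟩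
  · intro y hy
    rcases List.mem_cons.mp hy with rfl | hy
    · exact hc
    · exact hnn y hy
  · obtain ⟨z, l, rfl⟩ : ∃ z l, a = z :: l := by
      cases a with
      | nil => exact absurd rfl hane
      | cons z l => exact ⟨z, l, rfl⟩
    exact ⟨x, by simpa using Or.inr (by simpa using hx), hxpos⟩

lemma comp_chain_aux (v : Nat)
    (ihv : ∀ s : Nat, List.IsChain (StepRel (v+1) (s : Int)) (comp (v+1) s)) :
    ∀ (s c : Nat), c ≤ s →
      List.IsChain (StepRel (v+2) (s : Int))
        (((List.range (c+1)).reverse).flatMap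
          (fun c' => (comp (v+1) (s - c')).map (fun rest => ((c' : Int)) :: rest))) := by
  intro s c
  induction c with
  | zero =>
    intro _
    simp only [Nat.zero_add, List.range_one, List.reverse_singleton, List.flatMap_cons,
      List.flatMap_nil, List.append_nil, Nat.sub_zero, Nat.cast_zero]
    rw [List.isChain_map]
    exact (ihv s).imp (fun {a b} hab => by
      have := steprel_cons (v+1) (s : Int) 0 le_rfl a b (by simpa using hab)
      simpa using this)
  | succ c ihc =>
    intro hcs
    have hrev : (List.range (c+2)).reverse = (c+1) :: (List.range (c+1)).reverse := by
      rw [List.range_succ]; simp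
    rw [hrev, List.flatMap_cons]
    apply List.isChain_append.mpr
    refine ⟨?_, ihc (by omega), ?_⟩
    · rw [List.isChain_map]
      exact (ihv (s - (c+1))).imp (fun {a b} hab => by
        have hcast : ((s - (c+1) : Nat) : Int) = (s : Int) - ((c+1 : Nat) : Int) := by
          omega
        have := steprel_cons (v+1) (s : Int) ((c+1 : Nat) : Int) (by positivity) a b
          (by rwa [← hcast])
        simpa using this)
    · intro x hx y hy
      rw [List.getLast?_map, comp_getLast] at hx
      have hxe : x = ((c+1 : Nat) : Int) :: (List.replicate v 0 ++ [((s - (c+1) : Nat) : Int)]) := by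
        simpa using hx.symm
      have hhead : (((List.range (c+1)).reverse).flatMap
          (fun c' => (comp (v+1) (s - c')).map (fun rest => ((c' : Int)) :: rest))).head?
          = some ((c : Int) :: ((s - c : Nat) : Int) :: List.replicate v 0) := by
        have hrev2 : (List.range (c+1)).reverse = c :: (List.range c).reverse := by
          rw [List.range_succ]; simp
        rw [hrev2, List.flatMap_cons, List.head?_append, List.head?_map, comp_head]
        simp
      rw [hhead] at hy
      have hye : y = (c : Int) :: ((s - c : Nat) : Int) :: List.replicate v 0 := by
        simpa using hy.symm
      subst hxe hye
      refine ⟨by simp, ?_, ?_, ?_, ?_⟩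
      · intro z hz
        rcases List.mem_cons.mp hz with rfl | hz2
        · positivity
        · rcases List.mem_append.mp hz2 with h | h
          · rw [List.eq_of_mem_replicate h]
          · rw [List.mem_singleton.mp h]; positivity
      · simp
        omega
      · refine ⟨((c+1 : Nat) : Int), ?_, by positivity⟩
        rw [show ((c+1 : Nat) : Int) :: (List.replicate v (0:Int) ++ [((s - (c+1) : Nat) : Int)])
            = (((c+1 : Nat) : Int) :: List.replicate v 0) ++ [((s - (c+1) : Nat) : Int)] by simp,
          List.dropLast_concat]
        simp
      · have := step_block v (c : Int) ((s - (c+1) : Nat) : Int) (by positivity)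
        have hc1 : ((c+1 : Nat) : Int) = (c : Int) + 1 := by push_cast; ring
        have hd1 : ((s - (c+1) : Nat) : Int) + 1 = ((s - c : Nat) : Int) := by omega
        rw [hc1, this.trans (by rw [hd1])]

lemma comp_chain : ∀ (v s : Nat), List.IsChain (StepRel (v+1) (s : Int)) (comp (v+1) s) := by
  intro v
  induction v with
  | zero => intro s; simp only [comp]; exact List.isChain_singleton _
  | succ v ih =>
    intro s
    have := comp_chain_aux v ih s s le_rfl
    simpa [comp] using this

-- a non-final state (one with a later neighbour) does not trip the break test
lemma steprel_getLast_ne (n : Nat) (s : Int) (a b : List Int)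
    (h : StepRel n s a b) : a.getLast? ≠ some s := by
  obtain ⟨hlen, hnn, hsum, ⟨x, hx, hxpos⟩, hstep⟩ := h
  have hane : a ≠ [] := by rintro rfl; simp at hx
  have hdec := List.dropLast_append_getLast hane
  have hsum2 : a.dropLast.sum + a.getLast hane = s := by
    conv_lhs => rw [show a.dropLast.sum + a.getLast hane
        = (a.dropLast ++ [a.getLast hane]).sum by simp]
    rw [hdec, hsum]
  have hxle : x ≤ a.dropLast.sum :=
    List.single_le_sum (fun y hy => hnn y (List.dropLast_subset a hy)) x hx
  rw [List.getLast?_eq_some_getLast hane]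
  intro hcon
  have : a.getLast hane = s := by simpa using hcon
  omega

lemma loopB_run : ∀ (l : List (List Int)) (a : List Int) (n : Nat) (s : Int) (fuel : Nat),
    List.IsChain (StepRel n s) (a :: l) → (a :: l).length ≤ fuel →
    ((a :: l).getLast (List.cons_ne_nil a l)).getLast? = some s →
    loopB n s fuel a = a :: l := by
  intro l
  induction l with
  | nil =>
    intro a n s fuel _ hfuel hlast
    obtain ⟨f, rfl⟩ : ∃ f, fuel = f + 1 := by
      cases fuel with
      | zero => simp at hfuel
      | succ f => exact ⟨f, rfl⟩
    simp only [List.getLast_singleton] at hlast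
    simp [loopB, hlast]
  | cons b l' ih =>
    intro a n s fuel hchain hfuel hlast
    obtain ⟨hr, hchain'⟩ := List.isChain_cons_cons.mp hchain
    obtain ⟨f, rfl⟩ : ∃ f, fuel = f + 1 := by
      cases fuel with
      | zero => simp at hfuel
      | succ f => exact ⟨f, rfl⟩
    have hne := steprel_getLast_ne n s a b hr
    have hstep : stepComp n a = b := hr.2.2.2.2
    simp only [loopB, if_neg hne, hstep]
    congr 1
    apply ih b n s f hchain'
    · simpa using hfuel
    · rwa [List.getLast_cons (List.cons_ne_nil b l')] at hlast

lemma comp_length : ∀ (v s : Nat), (comp (v+1) s).length ≤ (s+1)^(v+1) := by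
  intro v
  induction v with
  | zero => intro s; simp [comp]
  | succ v ih =>
    intro s
    simp only [comp, List.length_flatMap]
    have hbound : ∀ x ∈ ((List.range (s+1)).reverse).map
        (fun c => ((comp (v+1) (s - c)).map (fun rest => ((c : Int)) :: rest)).length),
        x ≤ (s+1)^(v+1) := by
      intro x hx
      simp only [List.mem_map] at hx
      obtain ⟨c, _, rfl⟩ := hx
      rw [List.length_map]
      exact le_trans (ih (s - c)) (Nat.pow_le_pow_left (by omega) (v+1))
    calc (((List.range (s+1)).reverse).map
          (fun c => ((comp (v+1) (s - c)).map (fun rest => ((c : Int)) :: rest)).length)).sum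
        ≤ (((List.range (s+1)).reverse).map
          (fun c => ((comp (v+1) (s - c)).map (fun rest => ((c : Int)) :: rest)).length)).length
            • (s+1)^(v+1) := List.sum_le_card_nsmul _ _ hbound
      _ = (s+1) * (s+1)^(v+1) := by simp [smul_eq_mul]
      _ = (s+1)^(v+2) := by ring

lemma loopB_comp (v s : Nat) (fuel : Nat) (hf : (comp (v+1) s).length ≤ fuel) :
    loopB (v+1) (s : Int) fuel ((s : Int) :: List.replicate v 0) = comp (v+1) s := by
  cases hc : comp (v+1) s with
  | nil => exact absurd hc (comp_ne_nil v s)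
  | cons a l =>
    have hhead : a = (s : Int) :: List.replicate v 0 := by
      have := comp_head v s
      rw [hc] at this
      simpa using this
    have hchain := comp_chain v s
    rw [hc] at hchain
    have hlast : ((a :: l).getLast (List.cons_ne_nil a l)).getLast? = some (s : Int) := by
      have hgl := comp_getLast v s
      rw [hc, List.getLast?_eq_some_getLast (List.cons_ne_nil a l)] at hgl
      have : (a :: l).getLast (List.cons_ne_nil a l)
          = List.replicate v (0:Int) ++ [(s : Int)] := by simpa using hgl
      rw [this, List.getLast?_concat]
    rw [← hhead]
    apply loopB_run l a (v+1) (s : Int) fuel hchain (by rw [← hc]; exact hf) hlast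

-- ===== VERDICT (by name: the statement is the Claim_ definition above) =====
theorem generate_multi_indices_spec : Claim_equal_generate_multi_indices := by
  intro num_vars max_order _
  unfold Spec_generate_multi_indices generate_multi_indices generate_multi_indices_alt
  rw [PySem.List.foldl_append_eq_flatMap]
  simp only [List.nil_append]
  by_cases hnv : num_vars ≤ 0
  · have hpool : PySem.List.pyRange 0 num_vars 1 = [] :=
      PySem.List.pyRange_one_eq_nil hnv
    have htn : num_vars.toNat = 0 := Int.toNat_of_nonpos hnv
    rw [if_pos hnv]
    by_cases hmo : 0 ≤ max_order
    · rw [if_pos hmo]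
      rw [PySem.List.pyRange_one_cons (by omega : (0:Int) < max_order + 1)]
      simp only [List.flatMap_cons]
      have h0 : (cwr (PySem.List.pyRange 0 num_vars 1) (0:Int).toNat).map
          (toCounts num_vars.toNat) = [[]] := by
        simp [hpool, htn, cwr_zero, toCounts]
      rw [h0]
      have hrest : (PySem.List.pyRange (0+1) (max_order+1) 1).flatMap
          (fun t => (cwr (PySem.List.pyRange 0 num_vars 1) t.toNat).map
            (toCounts num_vars.toNat)) = [] := by
        apply List.flatMap_eq_nil_iff.mpr
        intro t ht
        have h1 : (1:Int) ≤ t := (PySem.List.mem_pyRange_one.mp ht).1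
        rw [hpool, cwr_nil_pos _ (by omega)]
        simp
      rw [hrest]
      simp
    · rw [if_neg hmo]
      rw [PySem.List.pyRange_one_eq_nil (by omega : max_order + 1 ≤ 0)]
      rfl
  · rw [if_neg hnv]
    replace hnv : 0 < num_vars := by omega
    obtain ⟨v, hv⟩ : ∃ v, num_vars.toNat = v + 1 := by
      refine ⟨num_vars.toNat - 1, ?_⟩
      omega
    rw [pool_eq, hv]
    rw [PySem.List.pyRange_one]
    rw [List.flatMap_map]
    simp only [zero_add, Int.sub_zero, Nat.add_sub_cancel]
    apply List.flatMap_congr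
    intro k _
    rw [cwr_counts]
    rw [loopB_comp v k (fuelB (v+1) (k : Int))
      (by simpa [fuelB] using comp_length v k)]
    congr 1
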